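-- pv_equiv track=rewrite | github.com/AlxSp/songbird | songbird/audio/build_audio_dataset.py | group_subsequent_values
-- ===== SOURCE A (Python) =====
-- def group_subsequent_values(value_array, step_size=1):
--     """
--     Return list of subsequent lists of numbers from vals which are below or meet the step size.
--
--     ----------
--     value_array : array-like
--         Ascending ordered array of values to group.
--     """
--     run = [value_array[0]]
--     result = [run]
--     for value in value_array[1:]:
--         if run[-1] + step_size >= value:
--             run.append(value)
--         else:
--             run = [value]
--             result.append(run)
--
--     return result
-- ===== SOURCE B (Python) =====
-- def group_subsequent_values(value_array, step_size=1):
--     result = []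
--     n = len(value_array)
--     i = 0
--     while i < n:
--         j = i + 1
--         while j < n and value_array[j - 1] + step_size >= value_array[j]:
--             j += 1
--         result.append(list(value_array[i:j]))
--         i = j
--     return result
-- ===== Notes on version B (the rewrite author's own statement) =====
-- stated objective: alternative
-- what changed: Replaces A's fused append-as-you-go loop (mutating the current run list aliased inside the result) with a two-pointer scan: an inner loop advances an index to the end of the current run, then one slice per run is appended.
import Mathlib
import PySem

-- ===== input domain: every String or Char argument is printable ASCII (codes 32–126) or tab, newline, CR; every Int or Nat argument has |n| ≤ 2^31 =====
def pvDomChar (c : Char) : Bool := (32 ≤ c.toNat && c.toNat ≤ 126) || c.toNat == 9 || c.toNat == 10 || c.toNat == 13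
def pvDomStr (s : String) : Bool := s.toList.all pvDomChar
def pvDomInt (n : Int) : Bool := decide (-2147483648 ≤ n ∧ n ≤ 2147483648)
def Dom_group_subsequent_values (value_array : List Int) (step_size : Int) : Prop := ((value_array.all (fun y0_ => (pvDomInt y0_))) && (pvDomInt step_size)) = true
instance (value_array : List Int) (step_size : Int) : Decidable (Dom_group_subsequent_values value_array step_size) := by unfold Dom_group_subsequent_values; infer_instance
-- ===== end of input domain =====

-- B replaces A's fused append-as-you-go loop by a two-pointer scan: an inner
-- pointer advances to the end of the current run, then one slice per run is
-- emitted; same O(n) cost, different decomposition (objective: alternative).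

-- ===== PORT A =====
-- loop state: acc = finished runs, run = the current (always nonempty) run
def goA (step_size : Int) : List Int → List (List Int) → List Int → List (List Int)
  | [], acc, run => acc ++ [run]
  | v :: vs, acc, run =>
    match PySem.List.pyGet? run (-1) with          -- run[-1]; run is never empty here
    | none => acc ++ [run]                         -- unreachable (IndexError in Python)
    | some last =>
      if last + step_size ≥ v then goA step_size vs acc (run ++ [v])
      else goA step_size vs (acc ++ [run]) [v]

def group_subsequent_values (value_array : List Int) (step_size : Int) : List (List Int) :=
  match PySem.List.pyGet? value_array 0 with       -- value_array[0]
  | none => []                                     -- IndexError on empty input: excluded by Pre_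
  | some v0 => goA step_size (PySem.List.slice value_array (some 1) none) [] [v0]

-- ===== PORT B =====
-- the inner while loop: advance j while j < n and value_array[j-1] + step_size >= value_array[j];
-- the Nat fuel only makes the recursion structural: it is (n - j).toNat, so fuel = 0 ↔ ¬ j < n
-- (the .getD 0 defaults are never taken: the guard keeps both indices in range)
def advBF (va : List Int) (s : Int) : Nat → Int → Int
  | 0, j => j
  | fuel + 1, j =>
    if (PySem.List.pyGet? va (j - 1)).getD 0 + s ≥ (PySem.List.pyGet? va j).getD 0
    then advBF va s fuel (j + 1)
    else j

def advB (va : List Int) (s n j : Int) : Int := advBF va s (n - j).toNat j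

-- the outer while loop over i; the fuel bounds the number of iterations (each one increases i),
-- so with fuel = va.length it never runs out before i < n fails
def outerBF (va : List Int) (s n : Int) : Nat → Int → List (List Int) → List (List Int)
  | 0, _, acc => acc
  | fuel + 1, i, acc =>
    if i < n then
      outerBF va s n fuel (advB va s n (i + 1))
        (acc ++ [PySem.List.slice va (some i) (some (advB va s n (i + 1)))])
    else acc

def group_subsequent_values_alt (value_array : List Int) (step_size : Int) : List (List Int) :=
  outerBF value_array step_size (value_array.length : Int) value_array.length 0 []

-- ===== PRECONDITION & SPEC =====
-- Pre_ excludes only the empty list, on which the Python A raises IndexError.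
def Pre_group_subsequent_values (value_array : List Int) (step_size : Int) : Prop :=
  value_array ≠ []
instance (value_array : List Int) (step_size : Int) : Decidable (Pre_group_subsequent_values value_array step_size) := by unfold Pre_group_subsequent_values; infer_instance

def pvWitness_group_subsequent_values : List Int × Int := ([1, 2, 5, 6], 1)

def Spec_group_subsequent_values (value_array : List Int) (step_size : Int) (out : List (List Int)) : Prop := out = group_subsequent_values_alt value_array step_size
instance (value_array : List Int) (step_size : Int) (out : List (List Int)) : Decidable (Spec_group_subsequent_values value_array step_size out) := by unfold Spec_group_subsequent_values; infer_instance

-- ===== CLAIM (what is proved, stated in full; the proofs are below) =====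
def Claim_equal_group_subsequent_values : Prop := ∀ (value_array : List Int) (step_size : Int), Dom_group_subsequent_values value_array step_size → Pre_group_subsequent_values value_array step_size → Spec_group_subsequent_values value_array step_size (group_subsequent_values value_array step_size)

-- ===== LEMMAS AND PROOFS =====

-- the maximal run after `prev` and the remainder of the list
def runSplit (s prev : Int) : List Int → List Int × List Int
  | [] => ([], [])
  | v :: vs =>
    if prev + s ≥ v then
      let p := runSplit s v vs
      (v :: p.1, p.2)
    else ([], v :: vs)

theorem runSplit_snd_length (s prev : Int) (l : List Int) :
    (runSplit s prev l).2.length ≤ l.length := by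
  induction l generalizing prev with
  | nil => simp [runSplit]
  | cons v vs ih =>
    simp only [runSplit]
    split
    · have := ih v; simp only [List.length_cons]; omega
    · simp

-- the canonical grouping both loops compute
def grps (s : Int) : List Int → List (List Int)
  | [] => []
  | v :: vs =>
    (v :: (runSplit s v vs).1) :: grps s (runSplit s v vs).2
termination_by l => l.length
decreasing_by have := runSplit_snd_length s v vs; simp; omega

-- runSplit splits the list at the length of its first component
theorem runSplit_take_drop (s prev : Int) (l : List Int) :
    (runSplit s prev l).1 = l.take (runSplit s prev l).1.length ∧
    (runSplit s prev l).2 = l.drop (runSplit s prev l).1.length := by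
  induction l generalizing prev with
  | nil => simp [runSplit]
  | cons v vs ih =>
    simp only [runSplit]
    split
    · obtain ⟨h1, h2⟩ := ih v
      refine ⟨?_, ?_⟩
      · simpa using h1
      · simpa using h2
    · simp

-- A's loop computes grps
theorem goA_eq (s : Int) (vs : List Int) (acc : List (List Int)) (pre : List Int) (prev : Int) :
    goA s vs acc (pre ++ [prev]) =
      acc ++ (pre ++ prev :: (runSplit s prev vs).1) :: grps s (runSplit s prev vs).2 := by
  induction vs generalizing acc pre prev with
  | nil => simp [goA, runSplit, grps]
  | cons v vs ih =>
    simp only [goA, PySem.List.pyGet?_neg_one_append_singleton, runSplit]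
    split
    · have := ih acc (pre ++ [prev]) v
      simpa using this
    · have := ih (acc ++ [pre ++ [prev]]) [] v
      rw [show ([v] : List Int) = [] ++ [v] from rfl, this]
      rw [grps]
      simp

-- B's inner loop stops exactly after the current run
theorem advB_eq (va : List Int) (s : Int) (k : Nat) (prev : Int) (rest : List Int)
    (h : va.drop k = prev :: rest) :
    advB va s (va.length : Int) ((k : Int) + 1) =
      (k : Int) + 1 + ((runSplit s prev rest).1.length : Int) := by
  induction rest generalizing k prev with
  | nil =>
    have hlen : va.length = k + 1 := by
      have := congrArg List.length h; simp at this; omega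
    have hf : ((va.length : Int) - ((k : Int) + 1)).toNat = 0 := by omega
    rw [advB, hf, advBF, runSplit]
    simp
  | cons v vs ih =>
    have hlen : k + 1 < va.length := by
      have := congrArg List.length h; simp at this; omega
    have hk : va[k]? = some prev := by
      have : (va.drop k)[0]? = some prev := by rw [h]; rfl
      simpa using this
    have hk1 : va[k + 1]? = some v := by
      have : (va.drop k)[1]? = some v := by rw [h]; rfl
      simpa using this
    have hdrop : va.drop (k + 1) = v :: vs := by
      have : (va.drop k).tail = v :: vs := by rw [h]; rfl
      simpa [List.tail_drop] using this
    obtain ⟨f, hf⟩ : ∃ f, ((va.length : Int) - ((k : Int) + 1)).toNat = f + 1 :=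
      ⟨va.length - k - 2, by omega⟩
    rw [advB, hf, advBF]
    have e1 : ((k : Int) + 1 - 1) = (k : Int) := by omega
    rw [e1, PySem.List.pyGet?_natCast, hk]
    have e2 : ((k : Int) + 1) = ((k + 1 : Nat) : Int) := by omega
    rw [e2, PySem.List.pyGet?_natCast, hk1]
    simp only [Option.getD_some, runSplit]
    split
    · have hback : advBF va s f (((k + 1 : Nat) : Int) + 1)
          = advB va s (va.length : Int) (((k + 1 : Nat) : Int) + 1) := by
        rw [advB]
        congr 1
        omega
      rw [hback, ih (k + 1) v hdrop]
      simp only [List.length_cons]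
      omega
    · simp

-- B's outer loop computes grps
theorem outerB_eq (va : List Int) (s : Int) (l : List Int) :
    ∀ (fuel k : Nat) (acc : List (List Int)), va.drop k = l → va.length ≤ k + fuel →
      outerBF va s (va.length : Int) fuel (k : Int) acc = acc ++ grps s l := by
  induction l using grps.induct (s := s) with
  | case1 =>
    intro fuel k acc h hfuel
    have hk : va.length ≤ k := by
      have := congrArg List.length h; simp at this; omega
    match fuel with
    | 0 => rw [outerBF, grps]; simp
    | f + 1 =>
      rw [outerBF, if_neg (by exact_mod_cast (by omega : ¬ (k < va.length))), grps]
      simp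
  | case2 v vs ih =>
    intro fuel k acc h hfuel
    have hk : k < va.length := by
      have := congrArg List.length h; simp at this; omega
    obtain ⟨ht, hd⟩ := runSplit_take_drop s v vs
    match fuel with
    | 0 => omega
    | f + 1 =>
      rw [outerBF, if_pos (by exact_mod_cast hk), advB_eq va s k v vs h]
      have eslice : PySem.List.slice va (some (k : Int))
          (some ((k : Int) + 1 + ((runSplit s v vs).1.length : Int))) =
          v :: (runSplit s v vs).1 := by
        rw [show ((k : Int) + 1 + ((runSplit s v vs).1.length : Int))
              = (k : Int) + ((1 + (runSplit s v vs).1.length : Nat) : Int) by omega]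
        rw [PySem.List.slice_natCast_add, h]
        simp [List.take_succ_cons, ← ht, Nat.add_comm]
      have hdrop2 : va.drop (k + 1 + (runSplit s v vs).1.length) = (runSplit s v vs).2 := by
        have step : va.drop (k + 1 + (runSplit s v vs).1.length)
            = (va.drop k).drop ((runSplit s v vs).1.length + 1) := by
          rw [List.drop_drop]; congr 1; omega
        rw [step, h, List.drop_succ_cons, ← hd]
      rw [eslice]
      have hrs : (runSplit s v vs).2.length ≤ vs.length := runSplit_snd_length s v vs
      have hlen2 : va.length = k + 1 + vs.length := by
        have := congrArg List.length h; simp at this; omega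
      have := ih f (k + 1 + (runSplit s v vs).1.length)
        (acc ++ [v :: (runSplit s v vs).1]) hdrop2 (by omega)
      rw [show (k : Int) + 1 + ((runSplit s v vs).1.length : Int)
            = ((k + 1 + (runSplit s v vs).1.length : Nat) : Int) by omega, this, grps]
      simp

-- ===== VERDICT (by name: the statement is the Claim_ definition above) =====
theorem group_subsequent_values_spec : Claim_equal_group_subsequent_values := by
  intro va s _dom hpre
  unfold Spec_group_subsequent_values
  match va with
  | [] => exact absurd rfl hpre
  | v :: rest =>
    unfold group_subsequent_values group_subsequent_values_alt
    rw [PySem.List.pyGet?_zero_cons, PySem.List.slice_from_one]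
    have hA := goA_eq s rest ([] : List (List Int)) [] v
    simp only [List.nil_append, List.tail_cons] at hA ⊢
    rw [hA]
    have hB := outerB_eq (v :: rest) s (v :: rest) (v :: rest).length 0 [] rfl (by omega)
    rw [show ((0 : Nat) : Int) = (0 : Int) from rfl] at hB
    simp only [List.nil_append] at hB
    rw [hB, grps]
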